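-- pv_equiv track=rewrite | github.com/kscz0000/Batch-Translation-of-Skills | batch_translator/services/minimax.py | _assemble_frontmatter
-- ===== SOURCE A (Python) =====
-- def _assemble_frontmatter(original: str, frontmatter: dict, translated_desc: str) -> str:
--     """重新组装 frontmatter
--
--     保留原始结构和非翻译字段，替换 description 为翻译后的版本
--     """
--     # 确定分隔符（保持与原文一致）
--     delimiter = '---'
--     if original.strip().startswith('***'):
--         delimiter = '***'
--
--     lines = []
--     in_original_fm = False
--     fm_ended = False
--
--     for line in original.split('\n'):
--         stripped = line.strip()
--
--         if not fm_ended: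
--             if stripped == delimiter and not in_original_fm:
--                 in_original_fm = True
--                 lines.append(line)
--                 continue
--             elif stripped == delimiter and in_original_fm:
--                 fm_ended = True
--                 lines.append(line)
--                 continue
--
--             if in_original_fm:
--                 # 处理 description 字段
--                 if stripped.startswith('description:'):
--                     if translated_desc:
--                         # 转义双引号
--                         escaped_desc = translated_desc.replace('"', '\\"')
--                         lines.append(f'description: "{escaped_desc}"')
--                     else:
--                         lines.append(line)
--                     # 跳过多行 description 的后续行
--                     continue
--
--                 # 跳过多行 description 的续行（缩进的行）
--                 if line.startswith('  ') and not any(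
--                     stripped.startswith(k + ':') for k in ('name', 'version', 'metadata', 'origin', 'category', 'tags')
--                 ):
--                     # 这可能是多行 description 的续行，跳过
--                     continue
--
--                 # 其他字段保持原样
--                 lines.append(line)
--         else:
--             break
--
--     result = '\n'.join(lines)
--     return result
-- ===== SOURCE B (Python) =====
-- _KEYS = ('name', 'version', 'metadata', 'origin', 'category', 'tags')
--
--
-- def _split_at_delim(lines, delimiter):
--     """Split a list of lines at the first line whose strip equals the delimiter.
--
--     Returns (before, the delimiter line or None, after)."""
--     for i, ln in enumerate(lines):
--         if ln.strip() == delimiter: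
--             return lines[:i], ln, lines[i + 1:]
--     return lines, None, []
--
--
-- def _convert(line, translated_desc):
--     """Output line for one inner frontmatter line, or None to drop it."""
--     s = line.strip()
--     if s.startswith('description:'):
--         if translated_desc:
--             return 'description: "%s"' % translated_desc.replace('"', '\\"')
--         return line
--     if line.startswith('  ') and not any(s.startswith(k + ':') for k in _KEYS):
--         return None
--     return line
--
--
-- def _assemble_frontmatter(original: str, frontmatter: dict, translated_desc: str) -> str:
--     delimiter = '***' if original.strip().startswith('***') else '---'
--     _, opening, body = _split_at_delim(original.split('\n'), delimiter)
--     if opening is None: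
--         return ''
--     inner, closing, _ = _split_at_delim(body, delimiter)
--     kept = [c for c in (_convert(ln, translated_desc) for ln in inner) if c is not None]
--     out = [opening] + kept + ([closing] if closing is not None else [])
--     return '\n'.join(out)
-- ===== Notes on version B (the rewrite author's own statement) =====
-- stated objective: simpler
-- what changed: Replaces A's single stateful loop (in_original_fm/fm_ended flags with break/continue) by a split-at-first-delimiter helper used twice to isolate the frontmatter region, then a per-line convert function applied as one filter over the inner lines.
import Mathlib
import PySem

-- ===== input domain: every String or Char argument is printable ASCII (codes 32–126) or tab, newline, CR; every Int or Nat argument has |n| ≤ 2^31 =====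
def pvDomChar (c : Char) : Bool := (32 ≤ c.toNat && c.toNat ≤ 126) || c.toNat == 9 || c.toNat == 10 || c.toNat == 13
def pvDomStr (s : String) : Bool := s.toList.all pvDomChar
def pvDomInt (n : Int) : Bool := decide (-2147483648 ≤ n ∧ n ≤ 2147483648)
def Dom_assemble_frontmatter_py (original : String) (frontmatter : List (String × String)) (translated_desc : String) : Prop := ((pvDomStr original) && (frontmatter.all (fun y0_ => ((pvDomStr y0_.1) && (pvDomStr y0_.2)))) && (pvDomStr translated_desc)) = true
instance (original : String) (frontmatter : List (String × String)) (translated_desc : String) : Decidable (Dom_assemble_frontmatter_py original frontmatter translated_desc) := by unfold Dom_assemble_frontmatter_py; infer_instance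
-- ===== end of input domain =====

-- B replaces A's three-flag state machine by a split-at-delimiter decomposition plus a per-line
-- filter-map over the inner frontmatter lines (objective: simpler; same cost).

-- ===== PORT A =====
-- A's loop over original.split('\n') with state (in_original_fm, fm_ended); 'break' right after the
-- closing delimiter is ported as stopping the recursion there. pvKeys is the shared tuple of known keys.
def pvKeys : List String := ["name", "version", "metadata", "origin", "category", "tags"]

def pvStepA (delim td : String) : List String → Bool → List String
  | [], _ => []
  | line :: rest, inFm =>
    if PySem.Str.strip line = delim ∧ inFm = false then
      line :: pvStepA delim td rest true
    else if PySem.Str.strip line = delim ∧ inFm = true then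
      [line]  -- fm_ended = True; the next iteration breaks
    else if inFm = true then
      if PySem.Str.startswith (PySem.Str.strip line) "description:" then
        (if td ≠ "" then "description: \"" ++ PySem.Str.replace td "\"" "\\\"" ++ "\"" else line)
          :: pvStepA delim td rest inFm
      else if PySem.Str.startswith line "  "
              ∧ ¬ (pvKeys.any fun k => PySem.Str.startswith (PySem.Str.strip line) (k ++ ":")) then
        pvStepA delim td rest inFm
      else
        line :: pvStepA delim td rest inFm
    else
      pvStepA delim td rest inFm

-- original.split('\n'): split? is none only for an empty separator, so .getD [] never fires
def assemble_frontmatter_py (original : String) (frontmatter : List (String × String)) (translated_desc : String) : String :=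
  let delimiter := if PySem.Str.startswith (PySem.Str.strip original) "***" then "***" else "---"
  PySem.Str.join "\n" (pvStepA delimiter translated_desc ((PySem.Str.split? original "\n").getD []) false)

-- ===== PORT B =====
-- Source B's _split_at_delim: (lines before, the first line whose strip equals delim or none, lines after)
def pvSplitAtDelim (delim : String) : List String → List String × Option String × List String
  | [] => ([], none, [])
  | l :: rest =>
    if PySem.Str.strip l = delim then ([], some l, rest)
    else
      let r := pvSplitAtDelim delim rest
      (l :: r.1, r.2.1, r.2.2)

-- Source B's _convert: the output line for one inner frontmatter line, or none to drop it
def pvConvert (line td : String) : Option String :=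
  if PySem.Str.startswith (PySem.Str.strip line) "description:" then
    some (if td ≠ "" then "description: \"" ++ PySem.Str.replace td "\"" "\\\"" ++ "\"" else line)
  else if PySem.Str.startswith line "  "
          ∧ ¬ (pvKeys.any fun k => PySem.Str.startswith (PySem.Str.strip line) (k ++ ":")) then
    none
  else some line

def assemble_frontmatter_py_alt (original : String) (frontmatter : List (String × String)) (translated_desc : String) : String :=
  let delimiter := if PySem.Str.startswith (PySem.Str.strip original) "***" then "***" else "---"
  let r := pvSplitAtDelim delimiter ((PySem.Str.split? original "\n").getD [])
  match r.2.1 with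
  | none => ""
  | some opening =>
    let r2 := pvSplitAtDelim delimiter r.2.2
    let kept := r2.1.filterMap (fun ln => pvConvert ln translated_desc)
    PySem.Str.join "\n" (opening :: kept ++ (match r2.2.1 with | some c => [c] | none => []))

-- ===== PRECONDITION & SPEC =====
def Spec_assemble_frontmatter_py (original : String) (frontmatter : List (String × String)) (translated_desc : String) (out : String) : Prop := out = assemble_frontmatter_py_alt original frontmatter translated_desc
instance (original : String) (frontmatter : List (String × String)) (translated_desc : String) (out : String) : Decidable (Spec_assemble_frontmatter_py original frontmatter translated_desc out) := by unfold Spec_assemble_frontmatter_py; infer_instance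

-- ===== CLAIM (what is proved, stated in full; the proofs are below) =====
def Claim_equal_assemble_frontmatter_py : Prop := ∀ (original : String) (frontmatter : List (String × String)) (translated_desc : String), Dom_assemble_frontmatter_py original frontmatter translated_desc → Spec_assemble_frontmatter_py original frontmatter translated_desc (assemble_frontmatter_py original frontmatter translated_desc)

-- ===== LEMMAS AND PROOFS =====

-- one non-delimiter frontmatter line: A's three inner branches are exactly pvConvert
lemma pvStepA_cons (d td l : String) (rest : List String) (hd : PySem.Str.strip l ≠ d) :
    pvStepA d td (l :: rest) true = (pvConvert l td).toList ++ pvStepA d td rest true := by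
  simp only [pvStepA, pvConvert, hd, false_and, if_false, and_true, if_true]
  split_ifs <;> simp

-- inside the frontmatter, A's state machine is B's filter-map up to (and including) the closing delimiter
lemma pvStepA_true (d td : String) (ls : List String) :
    pvStepA d td ls true =
      (pvSplitAtDelim d ls).1.filterMap (fun ln => pvConvert ln td)
        ++ (match (pvSplitAtDelim d ls).2.1 with | some c => [c] | none => []) := by
  induction ls with
  | nil => simp only [pvStepA, pvSplitAtDelim, List.filterMap_nil, List.nil_append]
  | cons l rest ih =>
    by_cases hd : PySem.Str.strip l = d
    · simp [pvStepA, pvSplitAtDelim, hd]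
    · rw [pvStepA_cons d td l rest hd]
      cases hc : pvConvert l td <;>
        simp [pvSplitAtDelim, hd, hc, ih]

-- before the frontmatter, A skips lines until the opening delimiter — exactly B's first split
lemma pvStepA_false (d td : String) (ls : List String) :
    pvStepA d td ls false =
      match (pvSplitAtDelim d ls).2.1 with
      | none => []
      | some op => op :: pvStepA d td (pvSplitAtDelim d ls).2.2 true := by
  induction ls with
  | nil => simp [pvStepA, pvSplitAtDelim]
  | cons l rest ih =>
    by_cases hd : PySem.Str.strip l = d
    · simp [pvStepA, pvSplitAtDelim, hd]
    · simp [pvStepA, pvSplitAtDelim, hd, ih]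

-- ===== VERDICT (by name: the statement is the Claim_ definition above) =====
theorem assemble_frontmatter_py_spec : Claim_equal_assemble_frontmatter_py := by
  intro original frontmatter td _
  unfold Spec_assemble_frontmatter_py assemble_frontmatter_py assemble_frontmatter_py_alt
  simp only [pvStepA_false]
  cases h : (pvSplitAtDelim (if PySem.Str.startswith (PySem.Str.strip original) "***" then "***" else "---") ((PySem.Str.split? original "\n").getD [])).2.1 with
  | none => simp only [h]; rfl
  | some op => simp only [h, pvStepA_true, List.cons_append]
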